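-- pv_equiv track=rewrite | github.com/itdinesh/lotapp-prod | pattern_engine_cust.py | compute_next_single_digit
-- ===== SOURCE A (Python) =====
-- def compute_next_single_digit(digit_list):
--     # ------------------------------------
--     # CLEAN INPUT
--     # ------------------------------------
--     digits = [int(d) for d in digit_list if str(d).isdigit()]
--
--     # ------------------------------------
--     # FALLBACK RULE: Only one digit
--     # ------------------------------------
--     if len(digits) < 2:
--         return digits[-1]  # repeat it
--
--     # ------------------------------------
--     # MIRROR RULE
--     # If last two digits are equal → use mirror-down
--     # ------------------------------------
--     if digits[-1] == digits[-2]: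
--         return (digits[-1] - 1) % 10
--
--     # ------------------------------------
--     # COMPUTE DIFFS
--     # ------------------------------------
--     diffs = []
--     for i in range(1, len(digits)):
--         diffs.append(digits[i] - digits[i - 1])
--
--     # ------------------------------------
--     # 3-DIGIT TREND RULE
--     # If last 3 diffs are equal → continue pattern
--     # Example: 4 → 6 → 8 → 10 (diff = +2)
--     # ------------------------------------
--     if len(diffs) >= 3:
--         d1, d2, d3 = diffs[-3], diffs[-2], diffs[-1]
--
--         if d1 == d2 == d3:
--             # Continue same difference pattern
--             return (digits[-1] + d3) % 10
--
--     # ------------------------------------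
--     # BASIC TREND RULE (Use last 2 digits)
--     # last=7, prev=5 → diff=+2 → next=9
--     # last=3, prev=6 → diff=-3 → next=0
--     # ------------------------------------
--     last = digits[-1]
--     prev = digits[-2]
--     diff = last - prev
--     next_digit = (last + diff) % 10
--
--     return next_digit
-- ===== SOURCE B (Python) =====
-- def compute_next_single_digit(digit_list):
--     # One backward scan with early exit: walk from the end, find the last two
--     # kept digits and decide on the spot.  No filtered list and no diffs list
--     # are ever built: A's 3-diff trend branch always returns the same value as
--     # its basic rule, because the last diff is exactly digits[-1] - digits[-2].
--     last = None
--     for d in reversed(digit_list):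
--         if d >= 0:
--             if last is None:
--                 last = d
--             elif d == last:
--                 return (last - 1) % 10
--             else:
--                 return (2 * last - d) % 10
--     return last
-- ===== Notes on version B (the rewrite author's own statement) =====
-- stated objective: faster
-- what changed: B replaces A's three staged passes (filter the whole list, build a diffs list, then rule cascade) by a single backward scan with early exit that stops as soon as the last two kept digits are seen, deciding in place; A's 3-diff trend branch is dropped because whenever it fires its value equals the basic rule's (the last diff is digits[-1]-digits[-2]); str(d).isdigit() on ints is d >= 0.
-- outside the precondition, e.g. on compute_next_single_digit([-1]): A raises IndexError, B returns None
import Mathlib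
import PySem

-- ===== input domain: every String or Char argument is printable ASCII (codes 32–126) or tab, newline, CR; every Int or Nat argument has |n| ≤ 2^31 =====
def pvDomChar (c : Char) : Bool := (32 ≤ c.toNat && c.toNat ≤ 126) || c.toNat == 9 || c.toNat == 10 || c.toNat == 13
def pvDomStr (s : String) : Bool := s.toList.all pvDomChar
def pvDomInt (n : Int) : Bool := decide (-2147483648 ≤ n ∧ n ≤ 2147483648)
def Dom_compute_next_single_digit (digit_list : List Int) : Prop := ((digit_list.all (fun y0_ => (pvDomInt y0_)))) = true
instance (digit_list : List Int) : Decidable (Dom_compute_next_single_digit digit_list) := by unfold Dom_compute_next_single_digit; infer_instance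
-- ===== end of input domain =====

-- B replaces A's filter-then-diffs-then-rules passes by one backward scan with early exit
-- over the last two kept digits (A's 3-diff branch is provably redundant).


-- ===== PORT A =====
def compute_next_single_digit (digit_list : List Int) : Int :=
  let digits := digit_list.filter (fun d => PySem.Str.strIsdigit (PySem.Int.toStr d))
  if digits.length < 2 then
    (PySem.List.pyGet? digits (-1)).getD 0
  else if (PySem.List.pyGet? digits (-1)).getD 0 = (PySem.List.pyGet? digits (-2)).getD 0 then
    PySem.Int.mod ((PySem.List.pyGet? digits (-1)).getD 0 - 1) 10
  else
    let diffs := (PySem.List.pyRange 1 (digits.length : Int) 1).foldl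
      (fun acc i => acc ++ [(PySem.List.pyGet? digits i).getD 0 - (PySem.List.pyGet? digits (i - 1)).getD 0]) []
    if 3 ≤ diffs.length ∧
        (PySem.List.pyGet? diffs (-3)).getD 0 = (PySem.List.pyGet? diffs (-2)).getD 0 ∧
        (PySem.List.pyGet? diffs (-2)).getD 0 = (PySem.List.pyGet? diffs (-1)).getD 0 then
      PySem.Int.mod ((PySem.List.pyGet? digits (-1)).getD 0 + (PySem.List.pyGet? diffs (-1)).getD 0) 10
    else
      PySem.Int.mod ((PySem.List.pyGet? digits (-1)).getD 0 +
        ((PySem.List.pyGet? digits (-1)).getD 0 - (PySem.List.pyGet? digits (-2)).getD 0)) 10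

-- ===== PORT B =====
-- Source B's loop over reversed(digit_list) with early return; the empty-acc base
-- case is Python's `return last` with last = None, reached only outside Pre_.
def csndGo : List Int → Option Int → Int
  | [], acc => acc.getD 0
  | d :: rest, acc =>
    if 0 ≤ d then
      match acc with
      | none => csndGo rest (some d)
      | some last =>
        if d = last then PySem.Int.mod (last - 1) 10
        else PySem.Int.mod (2 * last - d) 10
    else csndGo rest acc

def compute_next_single_digit_alt (digit_list : List Int) : Int :=
  csndGo digit_list.reverse none

-- ===== PRECONDITION & SPEC =====
-- Pre_ excludes exactly the inputs with no nonnegative element: there A raises IndexError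
-- on digits[-1] (and B's Python returns None, not an int).
def Pre_compute_next_single_digit (digit_list : List Int) : Prop := ∃ d ∈ digit_list, 0 ≤ d
instance (digit_list : List Int) : Decidable (Pre_compute_next_single_digit digit_list) := by unfold Pre_compute_next_single_digit; infer_instance
def pvWitness_compute_next_single_digit : List Int := [3, 5, 7]

def Spec_compute_next_single_digit (digit_list : List Int) (out : Int) : Prop := out = compute_next_single_digit_alt digit_list
instance (digit_list : List Int) (out : Int) : Decidable (Spec_compute_next_single_digit digit_list out) := by unfold Spec_compute_next_single_digit; infer_instance

-- ===== CLAIM (what is proved, stated in full; the proofs are below) =====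
def Claim_equal_compute_next_single_digit : Prop := ∀ (digit_list : List Int), Dom_compute_next_single_digit digit_list → Pre_compute_next_single_digit digit_list → Spec_compute_next_single_digit digit_list (compute_next_single_digit digit_list)

-- ===== LEMMAS AND PROOFS =====

lemma isdigit_digitChar (k : Nat) (hk : k < 10) : PySem.Chars.isdigit (Nat.digitChar k) = true := by
  interval_cases k <;> decide

lemma toDigitsCore_all_isdigit (fuel : Nat) : ∀ (n : Nat) (acc : List Char),
    acc.all PySem.Chars.isdigit = true →
    (Nat.toDigitsCore 10 fuel n acc).all PySem.Chars.isdigit = true := by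
  induction fuel with
  | zero => intro n acc h; simpa [Nat.toDigitsCore] using h
  | succ f ih =>
    intro n acc h
    have hd : PySem.Chars.isdigit (Nat.digitChar (n % 10)) = true :=
      isdigit_digitChar _ (Nat.mod_lt _ (by norm_num))
    simp only [Nat.toDigitsCore]
    split
    · simp [hd, h]
    · exact ih _ _ (by simp [hd, h])

lemma toDigitsCore_ne_nil (fuel : Nat) : ∀ (n : Nat) (acc : List Char),
    acc ≠ [] → Nat.toDigitsCore 10 fuel n acc ≠ [] := by
  induction fuel with
  | zero => intro n acc h; simpa [Nat.toDigitsCore] using h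
  | succ f ih =>
    intro n acc h
    simp only [Nat.toDigitsCore]
    split
    · simp
    · exact ih _ _ (by simp)

lemma toDigits_ne_nil (n : Nat) : Nat.toDigits 10 n ≠ [] := by
  rw [Nat.toDigits]
  simp only [Nat.toDigitsCore]
  split
  · simp
  · exact toDigitsCore_ne_nil _ _ _ (by simp)

lemma isdigit_toStr (d : Int) : PySem.Str.strIsdigit (PySem.Int.toStr d) = decide (0 ≤ d) := by
  by_cases h : 0 ≤ d
  · have hneg : ¬ d < 0 := by omega
    have h1 : ((Nat.toDigits 10 d.toNat).all PySem.Chars.isdigit) = true :=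
      toDigitsCore_all_isdigit _ _ _ (by simp)
    have h2 : (Nat.toDigits 10 d.toNat) ≠ [] := toDigits_ne_nil d.toNat
    simp [PySem.Str.strIsdigit, PySem.Int.toStr, PySem.Int.toChars, hneg,
      PySem.Chars.strIsdigit, h1, h2, h]
  · have hneg : d < 0 := by omega
    have hm : PySem.Chars.isdigit '-' = false := by decide
    simp [PySem.Str.strIsdigit, PySem.Int.toStr, PySem.Int.toChars, hneg,
      PySem.Chars.strIsdigit, h, hm]

lemma filter_eq (l : List Int) :
    l.filter (fun d => PySem.Str.strIsdigit (PySem.Int.toStr d)) = l.filter (fun d => decide (0 ≤ d)) := by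
  apply List.filter_congr
  intro x _
  exact isdigit_toStr x

-- B's scan skips rejected elements: it equals the scan of the filtered list.
lemma csndGo_filter : ∀ (xs : List Int) (acc : Option Int),
    csndGo xs acc = csndGo (xs.filter (fun d => decide (0 ≤ d))) acc := by
  intro xs
  induction xs with
  | nil => intro acc; rfl
  | cons d rest ih =>
    intro acc
    by_cases h : 0 ≤ d
    · rw [List.filter_cons_of_pos (by simpa using h)]
      cases acc with
      | none => simp only [csndGo, if_pos h]; exact ih _
      | some last => simp only [csndGo, if_pos h]
    · rw [List.filter_cons_of_neg (by simpa using h)]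
      simp only [csndGo, if_neg h]
      exact ih _

-- the last diff built by A's loop is digits[-1] - digits[-2]
lemma diffs_last (pre : List Int) (p a : Int) :
    (PySem.List.pyGet? ((PySem.List.pyRange 1 ((pre ++ [p, a]).length : Int) 1).foldl
      (fun acc i => acc ++ [(PySem.List.pyGet? (pre ++ [p, a]) i).getD 0 -
        (PySem.List.pyGet? (pre ++ [p, a]) (i - 1)).getD 0]) []) (-1)).getD 0 = a - p := by
  set dg := pre ++ [p, a] with hdg
  set f : Int → Int := fun i => (PySem.List.pyGet? dg i).getD 0 - (PySem.List.pyGet? dg (i - 1)).getD 0 with hf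
  have hlen : (dg.length : Int) = (pre.length : Int) + 1 + 1 := by simp [hdg]; omega
  have hr : PySem.List.pyRange 1 (dg.length : Int) 1
      = PySem.List.pyRange 1 ((pre.length : Int) + 1) 1 ++ [(pre.length : Int) + 1] := by
    rw [hlen]
    exact PySem.List.pyRange_one_succ_right (by omega)
  rw [PySem.List.foldl_append_singleton_eq_map, hr, List.map_append, List.nil_append]
  rw [List.map_singleton, PySem.List.pyGet?_neg_one_append_singleton]
  have g1 : dg[pre.length + 1]? = some a := by
    rw [hdg, List.getElem?_append_right (by simp)]; simp
  have g2 : dg[pre.length]? = some p := by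
    rw [hdg, List.getElem?_append_right (by simp)]; simp
  have e1 : ((pre.length : Int) + 1) = ((pre.length + 1 : Nat) : Int) := by push_cast; ring
  have h1 : PySem.List.pyGet? dg ((pre.length : Int) + 1) = some a := by
    rw [e1, PySem.List.pyGet?_natCast, g1]
  simp [h1, g2]

lemma pyGet_neg_two (pre : List Int) (p a : Int) :
    PySem.List.pyGet? (pre ++ [p, a]) (-2) = some p := by
  have h2 : (2 : Nat) ≤ (pre ++ [p, a]).length := by simp
  rw [PySem.List.pyGet?_neg_ofNat _ 2 (by norm_num) h2]
  have he : (pre ++ [p, a]).length - 2 = pre.length := by simp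
  rw [he]
  simp

-- ===== VERDICT (by name: the statement is the Claim_ definition above) =====
theorem compute_next_single_digit_spec : Claim_equal_compute_next_single_digit := by
  intro l _ hpre
  show compute_next_single_digit l = compute_next_single_digit_alt l
  unfold compute_next_single_digit compute_next_single_digit_alt
  rw [filter_eq, csndGo_filter, List.filter_reverse]
  set digits := l.filter (fun d => decide (0 ≤ d)) with hdigits
  have hne : digits ≠ [] := by
    obtain ⟨d, hd, hd0⟩ := hpre
    have : d ∈ digits := by
      rw [hdigits, List.mem_filter]; exact ⟨hd, by simpa using hd0⟩
    exact List.ne_nil_of_mem this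
  have hall : ∀ x ∈ digits, 0 ≤ x := by
    intro x hx
    rw [hdigits, List.mem_filter] at hx
    simpa using hx.2
  by_cases hlt : digits.length < 2
  · -- exactly one kept digit (empty is excluded by Pre_)
    obtain ⟨x, hx⟩ : ∃ x, digits = [x] := by
      match digits, hne, hlt with
      | [x], _, _ => exact ⟨x, rfl⟩
    have hx0 : 0 ≤ x := hall x (by simp [hx])
    rw [hx] at hlt ⊢
    simp [csndGo, hx0, PySem.List.pyGet?, PySem.List.pyIdx?]
  · -- digits has length ≥ 2: decompose as pre ++ [p, a]
    have h2 : 2 ≤ digits.length := by omega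
    obtain ⟨pre, p, a, hdec⟩ : ∃ pre p a, digits = pre ++ [p, a] := by
      rcases digits.eq_nil_or_concat with h | ⟨ys, a, hya⟩
      · exact absurd h hne
      rcases ys.eq_nil_or_concat with h | ⟨pre, p, hyp⟩
      · exfalso; rw [hya, h] at h2; simp at h2
      exact ⟨pre, p, a, by simp [hya, hyp]⟩
    have ha0 : 0 ≤ a := hall a (by simp [hdec])
    have hp0 : 0 ≤ p := hall p (by simp [hdec])
    rw [hdec] at hlt ⊢
    have hlast : PySem.List.pyGet? (pre ++ [p, a]) (-1) = some a := by
      have hsp : pre ++ [p, a] = (pre ++ [p]) ++ [a] := by simp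
      rw [hsp, PySem.List.pyGet?_neg_one_append_singleton]
    have hprev := pyGet_neg_two pre p a
    have hA1 : (PySem.List.pyGet? (pre ++ [p, a]) (-1)).getD 0 = a := by rw [hlast]; rfl
    have hA2 : (PySem.List.pyGet? (pre ++ [p, a]) (-2)).getD 0 = p := by rw [hprev]; rfl
    have hrev : (pre ++ [p, a]).reverse = a :: p :: pre.reverse := by simp
    rw [hrev]
    simp only [csndGo, if_pos ha0, if_pos hp0, if_neg hlt, hA1, hA2]
    by_cases heq : a = p
    · simp only [if_pos heq, if_pos heq.symm]
    · have hpa : ¬ p = a := fun h => heq h.symm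
      simp only [if_neg heq, if_neg hpa]
      have hd := diffs_last pre p a
      rw [hd]
      split
      · congr 1; ring
      · congr 1; ring
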